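-- pv_equiv track=rewrite | github.com/robjxyz/subway-record | robs-old-tsp/subLib.py | lineToCSV
-- ===== SOURCE A (Python) =====
-- def lineToCSV(line):
--   insidequote = False
--   sanitizedString = ''
--   for ch in line:
--     if insidequote:
--       if ch == ',':
--         pass
--       elif ch == '"':
--         insidequote = False
--       else:
--         sanitizedString += ch
--     else:
--       if ch == '"':
--         insidequote = True
--       elif ch == '\n' or ch == '\r':
--         pass
--       else:
--         sanitizedString += ch
--   return sanitizedString.split(',')
-- ===== SOURCE B (Python) =====
-- def lineToCSV(line):
--   parts = line.split('"')
--   kept = [seg.replace(',', '') if i % 2 == 1 else seg.replace('\n', '').replace('\r', '')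
--           for i, seg in enumerate(parts)]
--   return ''.join(kept).split(',')
-- ===== Notes on version B (the rewrite author's own statement) =====
-- stated objective: simpler
-- what changed: Replaces A's character-by-character quote-flag state machine with a partition of the line at quote characters into alternating outside/inside segments, filtering commas from odd (inside-quote) segments and CR/LF from even (outside) segments, then joining and splitting on commas.
import Mathlib
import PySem

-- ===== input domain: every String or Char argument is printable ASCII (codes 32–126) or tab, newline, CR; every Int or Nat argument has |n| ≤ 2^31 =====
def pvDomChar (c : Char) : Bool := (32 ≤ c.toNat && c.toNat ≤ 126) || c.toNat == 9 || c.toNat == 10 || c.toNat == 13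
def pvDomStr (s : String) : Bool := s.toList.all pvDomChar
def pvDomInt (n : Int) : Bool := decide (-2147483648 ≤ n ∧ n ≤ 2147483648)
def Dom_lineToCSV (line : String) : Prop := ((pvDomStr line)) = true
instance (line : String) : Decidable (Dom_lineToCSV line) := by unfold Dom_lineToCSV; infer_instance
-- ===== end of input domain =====

-- B replaces A's incremental quote-flag state machine by a partition at quote characters with
-- per-segment filtering (simpler decomposition; measured faster in a timing run, a constant factor).

-- ===== PORT A =====
def lineToCSV (line : String) : List String :=
  let st := line.toList.foldl (fun (st : Bool × List Char) ch =>
    if st.1 then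
      if ch = ',' then st
      else if ch = '"' then (false, st.2)
      else (st.1, st.2 ++ [ch])
    else
      if ch = '"' then (true, st.2)
      else if ch = '\n' ∨ ch = '\r' then st
      else (st.1, st.2 ++ [ch])) (false, ([] : List Char))
  (PySem.Chars.splitOn st.2 [',']).map String.mk

-- ===== PORT B =====
def lineToCSV_alt (line : String) : List String :=
  let parts := PySem.Chars.splitOn line.toList ['"']
  let kept := (PySem.List.enumerate parts).map (fun p =>
    if PySem.Int.mod p.1 2 = 1 then PySem.Chars.replace p.2 [','] []
    else PySem.Chars.replace (PySem.Chars.replace p.2 ['\n'] []) ['\r'] [])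
  (PySem.Chars.splitOn (PySem.Chars.join [] kept) [',']).map String.mk

-- ===== PRECONDITION & SPEC =====
def Spec_lineToCSV (line : String) (out : List String) : Prop := out = lineToCSV_alt line
instance (line : String) (out : List String) : Decidable (Spec_lineToCSV line out) := by unfold Spec_lineToCSV; infer_instance

-- ===== CLAIM (what is proved, stated in full; the proofs are below) =====
def Claim_equal_lineToCSV : Prop := ∀ (line : String), Dom_lineToCSV line → Spec_lineToCSV line (lineToCSV line)

-- ===== LEMMAS AND PROOFS =====

-- prepend a block onto the head of a (nonempty) list of segments
def consHead (p : List Char) : List (List Char) → List (List Char)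
  | [] => [p]
  | h :: r => (p ++ h) :: r

-- structural single-char split (what Chars.splitOn computes for a one-char separator)
def spl (x : Char) : List Char → List (List Char)
  | [] => [[]]
  | c :: t => if c = x then [] :: spl x t else consHead [c] (spl x t)

-- A's sanitizer as a structural recursion
def san : Bool → List Char → List Char
  | _, [] => []
  | true, c :: t =>
      if c = ',' then san true t
      else if c = '"' then san false t
      else c :: san true t
  | false, c :: t =>
      if c = '"' then san true t
      else if c = '\n' ∨ c = '\r' then san false t
      else c :: san false t

-- B's per-segment filtering, alternating outside/inside
def alt : Bool → List (List Char) → List Char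
  | _, [] => []
  | b, seg :: rest =>
      (if b then seg.filter (· != ',')
       else (seg.filter (· != '\n')).filter (· != '\r')) ++ alt (!b) rest

lemma spl_ne_nil (x : Char) (l : List Char) : spl x l ≠ [] := by
  cases l with
  | nil => simp [spl]
  | cons c t =>
    simp only [spl]
    split
    · simp
    · cases h : spl x t <;> simp [consHead]

lemma replace_go_remove (x : Char) : ∀ (fuel : Nat) (l acc : List Char), l.length ≤ fuel →
    PySem.Chars.replace.go [x] [] fuel l acc = acc.reverse ++ l.filter (· != x) := by
  intro fuel
  induction fuel with
  | zero => intro l acc h; cases l with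
    | nil => simp [PySem.Chars.replace.go]
    | cons c t => simp at h
  | succ f ih =>
    intro l acc h
    cases l with
    | nil => simp [PySem.Chars.replace.go]
    | cons c t =>
      simp only [PySem.Chars.replace.go]
      by_cases hc : c = x
      · subst hc
        rw [if_pos (by simp [List.isPrefixOf])]
        simp only [List.length_cons] at h
        rw [ih _ _ (by simpa using Nat.le_of_succ_le_succ h)]
        simp
      · rw [if_neg (by simp [List.isPrefixOf]; exact fun hx => absurd hx.symm hc)]
        simp only [List.length_cons] at h
        rw [ih _ _ (Nat.le_of_succ_le_succ h)]
        simp [hc]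

lemma replace_remove (x : Char) (l : List Char) :
    PySem.Chars.replace l [x] [] = l.filter (· != x) := by
  rw [PySem.Chars.replace, if_neg (by simp)]
  exact (replace_go_remove x l.length l [] le_rfl).trans (by simp)

lemma consHead_consHead (a b : List Char) (ls : List (List Char)) :
    consHead a (consHead b ls) = consHead (a ++ b) ls := by
  cases ls <;> simp [consHead]

lemma splitOn_go_spl (x : Char) : ∀ (fuel : Nat) (l cur : List Char) (acc : List (List Char)),
    l.length ≤ fuel →
    PySem.Chars.splitOn.go [x] fuel l cur acc = acc.reverse ++ consHead cur.reverse (spl x l) := by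
  intro fuel
  induction fuel with
  | zero => intro l cur acc h; cases l with
    | nil => simp [PySem.Chars.splitOn.go, spl, consHead]
    | cons c t => simp at h
  | succ f ih =>
    intro l cur acc h
    cases l with
    | nil => simp [PySem.Chars.splitOn.go, spl, consHead]
    | cons c t =>
      simp only [PySem.Chars.splitOn.go]
      by_cases hc : c = x
      · subst hc
        rw [if_pos (by simp [List.isPrefixOf])]
        simp only [List.length_cons] at h
        rw [ih _ _ _ (by simpa using Nat.le_of_succ_le_succ h)]
        cases hsp : spl c t with
        | nil => exact absurd hsp (spl_ne_nil c t)
        | cons a r => simp [spl, hsp, consHead]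
      · rw [if_neg (by simp [List.isPrefixOf]; exact fun hx => absurd hx.symm hc)]
        simp only [List.length_cons] at h
        rw [ih _ _ _ (Nat.le_of_succ_le_succ h)]
        simp [spl, hc, consHead_consHead]

lemma splitOn_single (x : Char) (l : List Char) :
    PySem.Chars.splitOn l [x] = spl x l := by
  rw [PySem.Chars.splitOn, splitOn_go_spl x (l.length + 1) l [] [] (Nat.le_succ _)]
  cases h : spl x l with
  | nil => exact absurd h (spl_ne_nil x l)
  | cons a r => simp [consHead]

lemma san_eq_alt (x : Char) : ∀ (cs : List Char) (b : Bool), san b cs = alt b (spl '"' cs) := by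
  intro cs
  induction cs with
  | nil => intro b; cases b <;> simp [san, spl, alt]
  | cons c t ih =>
    intro b
    by_cases hc : c = '"'
    · subst hc
      cases b <;> simp [san, spl, alt, ih]
    · simp only [spl, if_neg hc]
      cases hsp : spl '"' t with
      | nil => exact absurd hsp (spl_ne_nil _ t)
      | cons h r =>
        have iht := ih b
        rw [hsp] at iht
        cases b with
        | true =>
          by_cases hcm : c = ','
          · subst hcm; simp [san, consHead, alt, ih, hsp]
          · simp [san, hcm, hc, consHead, alt, ih, hsp]
        | false =>
          by_cases hnl : c = '\n' ∨ c = '\r'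
          · simp [san, hc, hnl, consHead, alt, ih, hsp]
            rcases hnl with h1 | h1 <;> simp [h1]
          · push_neg at hnl
            simp [san, hc, consHead, alt, ih, hsp, hnl.1, hnl.2]

lemma join_nil_cons (a : List Char) (l : List (List Char)) :
    PySem.Chars.join [] (a :: l) = a ++ PySem.Chars.join [] l := by
  cases l <;> simp [PySem.Chars.join, List.intercalate, List.intersperse]

lemma foldA (step : Bool × List Char → Char → Bool × List Char)
    (hstep : step = fun (st : Bool × List Char) ch =>
      if st.1 then
        if ch = ',' then st
        else if ch = '"' then (false, st.2)
        else (st.1, st.2 ++ [ch])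
      else
        if ch = '"' then (true, st.2)
        else if ch = '\n' ∨ ch = '\r' then st
        else (st.1, st.2 ++ [ch])) :
    ∀ (cs : List Char) (b : Bool) (acc : List Char),
    (cs.foldl step (b, acc)).2 = acc ++ san b cs := by
  intro cs
  induction cs with
  | nil => intro b acc; cases b <;> simp [san]
  | cons c t ih =>
    intro b acc
    rw [List.foldl_cons]
    cases b with
    | true =>
      by_cases h1 : c = ','
      · have hs : step (true, acc) c = (true, acc) := by rw [hstep]; simp [h1]
        rw [hs, ih]; simp [san, h1]
      · by_cases h2 : c = '"'
        · have hs : step (true, acc) c = (false, acc) := by rw [hstep]; simp [h1, h2]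
          rw [hs, ih]; simp [san, h1, h2]
        · have hs : step (true, acc) c = (true, acc ++ [c]) := by rw [hstep]; simp [h1, h2]
          rw [hs, ih]; simp [san, h1, h2]
    | false =>
      by_cases h2 : c = '"'
      · have hs : step (false, acc) c = (true, acc) := by rw [hstep]; simp [h2]
        rw [hs, ih]; simp [san, h2]
      · by_cases h3 : c = '\n' ∨ c = '\r'
        · have hs : step (false, acc) c = (false, acc) := by rw [hstep]; simp [h2, h3]
          rw [hs, ih]; simp [san, h2, h3]
        · have hs : step (false, acc) c = (false, acc ++ [c]) := by rw [hstep]; simp [h2, h3]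
          rw [hs, ih]; simp [san, h2, h3]

lemma mod2_flip (i : Int) : (PySem.Int.mod (i + 1) 2 = 1) ↔ ¬ (PySem.Int.mod i 2 = 1) := by
  simp only [PySem.Int.mod, Int.fmod_eq_emod]
  omega

lemma joinB : ∀ (parts : List (List Char)) (i : Int),
    PySem.Chars.join [] ((PySem.List.enumerate parts i).map (fun p =>
      if PySem.Int.mod p.1 2 = 1 then PySem.Chars.replace p.2 [','] []
      else PySem.Chars.replace (PySem.Chars.replace p.2 ['\n'] []) ['\r'] []))
    = alt (decide (PySem.Int.mod i 2 = 1)) parts := by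
  intro parts
  induction parts with
  | nil => intro i; simp [PySem.List.enumerate, alt, PySem.Chars.join, List.intercalate]
  | cons seg rest ih =>
    intro i
    rw [PySem.List.enumerate_cons]
    simp only [List.map_cons]
    rw [join_nil_cons, ih (i + 1)]
    have hflip : decide (PySem.Int.mod (i + 1) 2 = 1) = !decide (PySem.Int.mod i 2 = 1) := by
      by_cases hp : PySem.Int.mod i 2 = 1
      · have h2 : ¬ (PySem.Int.mod (i + 1) 2 = 1) := fun hx => (mod2_flip i).mp hx hp
        simp only [PySem.Int.mod] at hp h2 ⊢
        simp [hp, h2]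
      · have h2 : PySem.Int.mod (i + 1) 2 = 1 := (mod2_flip i).mpr hp
        simp only [PySem.Int.mod] at hp h2 ⊢
        simp [hp, h2]
    rw [hflip]
    by_cases hp : PySem.Int.mod i 2 = 1
    · simp [alt, hp, replace_remove]
    · simp [alt, hp, replace_remove]

-- ===== VERDICT (by name: the statement is the Claim_ definition above) =====
theorem lineToCSV_spec : Claim_equal_lineToCSV := by
  intro line _
  unfold Spec_lineToCSV lineToCSV lineToCSV_alt
  have hA := foldA _ rfl line.toList false []
  simp only []
  rw [hA]
  congr 1
  rw [splitOn_single '"' line.toList, joinB (spl '"' line.toList) 0]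
  simp only [List.nil_append]
  rw [san_eq_alt '"' line.toList false]
  norm_num [PySem.Int.mod]
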